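-- pv_equiv track=rewrite | github.com/randogoth/md2txt | src/md2txt/renderers/ama.py | _line_end_mode
-- ===== SOURCE A (Python) =====
-- def _line_end_mode(line: str) -> str:
--     mode = "%t"
--     idx = 0
--     while True:
--         pos = line.find("%", idx)
--         if pos == -1 or pos + 1 >= len(line):
--             break
--         code = line[pos:pos + 2]
--         if code in {"%!", "%b", "%t"}:
--             mode = code
--         elif code == "%%":
--             pass
--         idx = pos + 2
--     return mode
-- ===== SOURCE B (Python) =====
-- def _line_end_mode(line: str) -> str:
--     # Scan RIGHT-TO-LEFT and return at the first (= last in the string) valid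
--     # mode escape.  A '%x' pair at position p is a real escape of the
--     # left-to-right non-overlapping pairing iff the maximal run of '%'
--     # characters ending at p has ODD length (an even run pairs up as '%%'
--     # escapes and leaves x unescaped).
--     for p in range(len(line) - 2, -1, -1):
--         if line[p] != '%':
--             continue
--         c = line[p + 1]
--         if c not in '!bt':
--             continue
--         q = p
--         while q > 0 and line[q - 1] == '%':
--             q -= 1
--         if (p - q + 1) % 2 == 1:
--             return '%' + c
--     return "%t"
-- ===== Notes on version B (the rewrite author's own statement) =====
-- stated objective: alternative
-- what changed: A scans left-to-right with repeated str.find, pairing escapes forward and overwriting a mode accumulator; B scans right-to-left and returns immediately at the first position that holds a valid mode escape, deciding escape-hood locally by the parity of the run of '%' characters ending there (odd run = real escape), with no accumulator and no forward pairing.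
import Mathlib
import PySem

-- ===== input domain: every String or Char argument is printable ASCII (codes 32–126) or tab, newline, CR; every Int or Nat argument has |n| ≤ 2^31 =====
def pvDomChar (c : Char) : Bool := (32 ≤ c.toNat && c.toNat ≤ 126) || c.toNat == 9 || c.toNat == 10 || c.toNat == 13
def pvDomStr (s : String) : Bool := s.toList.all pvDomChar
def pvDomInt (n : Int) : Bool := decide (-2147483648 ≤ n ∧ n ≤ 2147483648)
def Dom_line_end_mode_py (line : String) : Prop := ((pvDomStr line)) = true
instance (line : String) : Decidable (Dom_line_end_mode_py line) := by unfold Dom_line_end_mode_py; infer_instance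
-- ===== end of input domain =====

-- B replaces A's forward find-loop with mode accumulator by a right-to-left scan that
-- returns at the last valid escape, deciding escape-hood by '%'-run parity (objective: alternative).


-- ===== PORT A =====
-- the while-loop of A, state = (mode, idx); fuel only makes the recursion structural
-- (fuel = len+1 always suffices: each iteration moves idx past the found '%')
def pvALoop (line : List Char) (fuel : Nat) (mode : String) (idx : Nat) : String :=
  match fuel with
  | 0 => mode
  | fuel + 1 =>
    let pos := PySem.Chars.findFrom line ['%'] (idx : Int)       -- pos = line.find("%", idx)
    if pos = -1 ∨ (line.length : Int) ≤ pos + 1 then mode        -- if pos == -1 or pos+1 >= len(line): break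
    else
      let code := PySem.List.slice line (some pos) (some (pos + 2))   -- code = line[pos:pos+2]
      pvALoop line fuel
        (if code = "%!".toList ∨ code = "%b".toList ∨ code = "%t".toList then String.ofList code else mode)
        (pos.toNat + 2)                                          -- idx = pos + 2

def line_end_mode_py (line : String) : String := pvALoop line.toList (line.toList.length + 1) "%t" 0

-- ===== PORT B =====
-- B's inner while loop: length of the maximal run of '%' ending at position p
-- (Python: q = p; while q > 0 and line[q-1] == '%': q -= 1; run = p - q + 1)
def pvRun (line : List Char) : Nat → Nat
  | 0 => 1
  | p + 1 => if line.getD p ' ' = '%' then pvRun line p + 1 else 1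

-- B's backward for-loop: counter n+1 means current position p = n; indices p and p+1
-- are always in range during real use (p ≤ len-2), so getD is exact there
def pvBLoop (line : List Char) : Nat → String
  | 0 => "%t"
  | n + 1 =>
    if line.getD n ' ' = '%' then
      let c := line.getD (n + 1) ' '
      if c = '!' ∨ c = 'b' ∨ c = 't' then
        if pvRun line n % 2 = 1 then String.ofList ['%', c] else pvBLoop line n
      else pvBLoop line n
    else pvBLoop line n

def line_end_mode_py_alt (line : String) : String :=
  pvBLoop line.toList (line.toList.length - 1)   -- range(len-2, -1, -1) has len-1 iterations

-- ===== PRECONDITION & SPEC =====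
def Spec_line_end_mode_py (line : String) (out : String) : Prop := out = line_end_mode_py_alt line
instance (line : String) (out : String) : Decidable (Spec_line_end_mode_py line out) := by unfold Spec_line_end_mode_py; infer_instance

-- ===== CLAIM (what is proved, stated in full; the proofs are below) =====
def Claim_equal_line_end_mode_py : Prop := ∀ (line : String), Dom_line_end_mode_py line → Spec_line_end_mode_py line (line_end_mode_py line)

-- ===== LEMMAS AND PROOFS =====

-- equation lemmas (controlled unfolding)
theorem pvRun_succ (l : List Char) (p : Nat) :
    pvRun l (p + 1) = if l.getD p ' ' = '%' then pvRun l p + 1 else 1 := rfl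

theorem pvBLoop_succ (l : List Char) (n : Nat) :
    pvBLoop l (n + 1) =
      (if l.getD n ' ' = '%' then
        if l.getD (n + 1) ' ' = '!' ∨ l.getD (n + 1) ' ' = 'b' ∨ l.getD (n + 1) ' ' = 't' then
          if pvRun l n % 2 = 1 then String.ofList ['%', l.getD (n + 1) ' '] else pvBLoop l n
        else pvBLoop l n
      else pvBLoop l n) := rfl

-- proof-side tokenizer: the char after each non-overlapping '%' in left-to-right pairing
def pvTok : List Char → List Char
  | [] => []
  | a :: rest =>
    if a = '%' then
      match rest with
      | [] => []
      | c :: r => c :: pvTok r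
    else pvTok rest

-- proof-side spec: the last mode char among the tokens
def pvSpec : List Char → Option Char
  | [] => none
  | a :: rest =>
    if a = '%' then
      match rest with
      | [] => none
      | c :: r =>
        match pvSpec r with
        | some d => some d
        | none => if c = '!' ∨ c = 'b' ∨ c = 't' then some c else none
    else pvSpec rest

-- induction principle matching the token structure: empty, non-'%' head, lone '%', '%'-pair head
theorem pvTwoStep {P : List Char → Prop}
    (h1 : P [])
    (h2 : ∀ (a : Char) (r : List Char), a ≠ '%' → P r → P (a :: r))
    (h3 : P ['%'])
    (h4 : ∀ (c : Char) (r : List Char), P r → P ('%' :: c :: r)) :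
    ∀ l, P l := by
  intro l
  induction hn : l.length using Nat.strong_induction_on generalizing l with
  | _ n ih =>
    match l with
    | [] => exact h1
    | a :: rest =>
      by_cases ha : a = '%'
      · subst ha
        match rest with
        | [] => exact h3
        | c :: r =>
          exact h4 c r (ih r.length (by simp [← hn]) r rfl)
      · exact h2 a rest ha (ih rest.length (by simp [← hn]) rest rfl)

theorem pvTok_skip {a : Char} {rest : List Char} (h : a ≠ '%') :
    pvTok (a :: rest) = pvTok rest := by
  rw [pvTok.eq_def]; simp [h]

theorem pvTok_cons {c : Char} {rest : List Char} :
    pvTok ('%' :: c :: rest) = c :: pvTok rest := by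
  rw [pvTok.eq_def]; simp

theorem pvSpec_skip {a : Char} {rest : List Char} (h : a ≠ '%') :
    pvSpec (a :: rest) = pvSpec rest := by
  rw [pvSpec.eq_def]; simp [h]

theorem pvSpec_cons {c : Char} {r : List Char} :
    pvSpec ('%' :: c :: r) =
      (match pvSpec r with
       | some d => some d
       | none => if c = '!' ∨ c = 'b' ∨ c = 't' then some c else none) := by
  rw [pvSpec.eq_def]; rfl

theorem pvTok_append_no_pct {m l : List Char} (h : '%' ∉ m) : pvTok (m ++ l) = pvTok l := by
  induction m with
  | nil => rfl
  | cons a rest ih =>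
    have ha : a ≠ '%' := fun e => h (e ▸ List.mem_cons_self)
    rw [List.cons_append, pvTok_skip ha, ih (fun hm => h (List.mem_cons_of_mem _ hm))]

theorem pvTok_no_pct {l : List Char} (h : '%' ∉ l) : pvTok l = [] := by
  have := pvTok_append_no_pct (l := ([] : List Char)) h
  rw [List.append_nil] at this
  exact this

theorem pv_singleton_infix_iff {c : Char} {l : List Char} : [c] <:+: l ↔ c ∈ l := by
  constructor
  · rintro ⟨s, t, rfl⟩; simp
  · intro hm
    obtain ⟨s, t, rfl⟩ := List.mem_iff_append.mp hm
    exact ⟨s, t, by simp⟩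

-- no '%' strictly before the found position: the skipped stretch tokenizes to nothing
theorem pv_no_pct_take {line : List Char} {idx p : Nat} (hk : idx ≤ line.length)
    (hmin : ∀ (i : ℕ), idx ≤ i → i < p → ¬ ['%'] <+: line.drop i) :
    '%' ∉ (line.drop idx).take (p - idx) := by
  intro hm
  obtain ⟨j, hj, hget⟩ := List.getElem_of_mem hm
  have hjl : j < min (p - idx) (line.length - idx) := by
    simpa [List.length_take, List.length_drop] using hj
  have hlt : idx + j < line.length := by omega
  rw [List.getElem_take, List.getElem_drop] at hget
  refine hmin (idx + j) (by omega) (by omega) ?_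
  refine ⟨line.drop (idx + j + 1), ?_⟩
  rw [List.drop_eq_getElem_cons hlt, List.singleton_append]
  congr 1
  exact hget.symm

theorem pv_drop_decomp {line : List Char} {idx p : Nat} (h : idx ≤ p) :
    line.drop idx = (line.drop idx).take (p - idx) ++ line.drop p := by
  conv_lhs => rw [← List.take_append_drop (p - idx) (line.drop idx)]
  rw [List.drop_drop, show idx + (p - idx) = p from by omega]

-- A's loop from idx computes the last-mode fold over the tokens of the tail
theorem pvALoop_eq (N : Nat) : ∀ (line : List Char) (mode : String) (idx : Nat),
    line.length + 1 - idx ≤ N → idx ≤ line.length →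
    pvALoop line N mode idx =
      (pvTok (line.drop idx)).foldl
        (fun m c => if c = '!' ∨ c = 'b' ∨ c = 't' then String.ofList ['%', c] else m) mode := by
  induction N with
  | zero => intro line mode idx hN hk; omega
  | succ N ih =>
    intro line mode idx hN hk
    rw [pvALoop]
    set pos := PySem.Chars.findFrom line ['%'] (idx : Int) with hposdef
    by_cases hend : pos = -1 ∨ (line.length : Int) ≤ pos + 1
    · rw [if_pos hend]
      by_cases h1 : pos = -1
      · have hno : ¬ ['%'] <:+: line.drop idx :=
          (PySem.Chars.findFrom_natCast_eq_neg_one_iff line ['%'] idx hk).mp h1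
        rw [pvTok_no_pct (fun hm => hno (pv_singleton_infix_iff.mpr hm))]
        rfl
      · have h2 : (line.length : Int) ≤ pos + 1 := hend.resolve_left h1
        obtain ⟨hle, hpre, hmin⟩ := PySem.Chars.findFrom_natCast_spec line ['%'] idx hk h1
        set p := pos.toNat with hp
        have hplt : p < line.length := by
          by_contra hge
          rw [List.drop_eq_nil_of_le (by omega)] at hpre
          simp at hpre
        have hdropp : line.drop p = ['%'] := by
          have hlen1 : (line.drop p).length = 1 := by
            rw [List.length_drop]; omega
          obtain ⟨t, ht⟩ := hpre
          cases t with
          | nil => simpa using ht.symm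
          | cons x xs => rw [← ht] at hlen1; simp at hlen1
        have hidxp : idx ≤ p := by omega
        rw [pv_drop_decomp hidxp, pvTok_append_no_pct (pv_no_pct_take hk hmin), hdropp]
        rfl
    · rw [if_neg hend]
      have h1 : pos ≠ -1 := fun e => hend (Or.inl e)
      have h2 : ¬ ((line.length : Int) ≤ pos + 1) := fun e => hend (Or.inr e)
      obtain ⟨hle, hpre, hmin⟩ := PySem.Chars.findFrom_natCast_spec line ['%'] idx hk h1
      set p := pos.toNat with hp
      have hposnn : (0 : Int) ≤ pos := le_trans (by omega) hle
      have hidxp : idx ≤ p := by omega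
      have hp1 : p + 1 < line.length := by omega
      set c : Char := getElem line (p + 1) hp1 with hc
      have hgp : getElem line p (by omega : p < line.length) = '%' := by
        obtain ⟨t, ht⟩ := hpre
        rw [List.drop_eq_getElem_cons (by omega : p < line.length), List.singleton_append] at ht
        exact (List.cons_eq_cons.mp ht).1.symm
      have hdropp : line.drop p = '%' :: c :: line.drop (p + 2) := by
        rw [List.drop_eq_getElem_cons (by omega : p < line.length),
          List.drop_eq_getElem_cons (by omega : p + 1 < line.length), hgp]
      have hslice : PySem.List.slice line (some pos) (some (pos + 2)) = ['%', c] := by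
        rw [PySem.List.slice_toNat line hposnn (by omega), ← hp,
          show (pos + 2).toNat - p = 2 from by omega, hdropp]
        rfl
      rw [pv_drop_decomp hidxp, pvTok_append_no_pct (pv_no_pct_take hk hmin), hdropp,
        pvTok_cons, List.foldl_cons, hslice]
      have hcond : (['%', c] = "%!".toList ∨ ['%', c] = "%b".toList ∨ ['%', c] = "%t".toList) ↔
          (c = '!' ∨ c = 'b' ∨ c = 't') := by
        simp [show "%!".toList = ['%', '!'] from rfl, show "%b".toList = ['%', 'b'] from rfl,
          show "%t".toList = ['%', 't'] from rfl]
      exact (ih line _ (p + 2) (by omega) (by omega)).trans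
        (by rw [if_congr hcond rfl rfl])

-- the fold over the tokens equals the pvSpec last-mode characterization
theorem pv_fold_tok_eq (l : List Char) : ∀ (m : String),
    (pvTok l).foldl
      (fun m c => if c = '!' ∨ c = 'b' ∨ c = 't' then String.ofList ['%', c] else m) m =
      (match pvSpec l with
       | some d => String.ofList ['%', d]
       | none => m) := by
  induction l using pvTwoStep with
  | h1 => intro m; rfl
  | h2 a r ha ih => intro m; rw [pvTok_skip ha, pvSpec_skip ha, ih]
  | h3 => intro m; rfl
  | h4 c r ih =>
    intro m
    rw [pvTok_cons, List.foldl_cons, ih, pvSpec_cons]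
    cases hs : pvSpec r with
    | some d => rfl
    | none => by_cases hc : c = '!' ∨ c = 'b' ∨ c = 't' <;> simp [hc]

-- proof-side version of B's backward loop returning the found char (if any)
def pvBFind (line : List Char) : Nat → Option Char
  | 0 => none
  | n + 1 =>
    if line.getD n ' ' = '%' then
      if line.getD (n + 1) ' ' = '!' ∨ line.getD (n + 1) ' ' = 'b' ∨ line.getD (n + 1) ' ' = 't' then
        if pvRun line n % 2 = 1 then some (line.getD (n + 1) ' ')
        else pvBFind line n
      else pvBFind line n
    else pvBFind line n

theorem pvBFind_succ (l : List Char) (n : Nat) :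
    pvBFind l (n + 1) =
      (if l.getD n ' ' = '%' then
        if l.getD (n + 1) ' ' = '!' ∨ l.getD (n + 1) ' ' = 'b' ∨ l.getD (n + 1) ' ' = 't' then
          if pvRun l n % 2 = 1 then some (l.getD (n + 1) ' ')
          else pvBFind l n
        else pvBFind l n
      else pvBFind l n) := rfl

theorem pvBLoop_eq_find (l : List Char) (n : Nat) :
    pvBLoop l n = (match pvBFind l n with
                   | some c => String.ofList ['%', c]
                   | none => "%t") := by
  induction n with
  | zero => rfl
  | succ n ih =>
    rw [pvBLoop_succ l n, pvBFind_succ l n]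
    split_ifs <;> simp [ih]

-- getD shifts under cons (definitional)
theorem pv_getD_cons2 (x y : Char) (r : List Char) (j : Nat) :
    (x :: y :: r).getD (j + 2) ' ' = r.getD j ' ' := rfl

theorem pv_getD_cons1 (x : Char) (r : List Char) (j : Nat) :
    (x :: r).getD (j + 1) ' ' = r.getD j ' ' := rfl

-- run-length parity is preserved by peeling '%'::c off the front (positions shift by 2)
theorem pvRun_shift2 (c : Char) (r : List Char) :
    ∀ j, pvRun ('%' :: c :: r) (j + 2) % 2 = pvRun r j % 2 := by
  intro j
  induction j with
  | zero =>
    rw [show (0 + 2 : Nat) = 1 + 1 from rfl, pvRun_succ ('%' :: c :: r) 1]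
    by_cases hc : c = '%' <;> simp [pvRun, hc]
  | succ j ih =>
    rw [show j + 1 + 2 = (j + 2) + 1 from rfl, pvRun_succ ('%' :: c :: r) (j + 2),
      pv_getD_cons2, pvRun_succ r j]
    split_ifs with h
    · omega
    · rfl

-- run-length is preserved by peeling a non-'%' head (positions shift by 1)
theorem pvRun_shift1 {a : Char} (r : List Char) (ha : a ≠ '%') :
    ∀ j, pvRun (a :: r) (j + 1) = pvRun r j := by
  intro j
  induction j with
  | zero => simp [pvRun, ha]
  | succ j ih =>
    rw [pvRun_succ (a :: r) (j + 1), pv_getD_cons1, ih, pvRun_succ r j]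

-- peeling a '%'-pair off the front: search the rest first, the head escape is checked last
theorem pvBFind_shift2 (c : Char) (r : List Char) :
    ∀ n, pvBFind ('%' :: c :: r) (n + 2) =
      (match pvBFind r n with
       | some d => some d
       | none => if c = '!' ∨ c = 'b' ∨ c = 't' then some c else none) := by
  intro n
  induction n with
  | zero =>
    -- iteration p = 1 is dead (its '%'-run has even length 2, or the char there is not '%');
    -- iteration p = 0 has run length 1 (odd): hit iff c is a mode char
    have hrun1 : pvRun ('%' :: c :: r) 1 = 2 := by simp [pvRun]
    have e1 : pvBFind ('%' :: c :: r) 2 = pvBFind ('%' :: c :: r) 1 := by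
      rw [show (2 : Nat) = 1 + 1 from rfl, pvBFind_succ ('%' :: c :: r) 1, hrun1]
      simp
    rw [show (0 + 2 : Nat) = 2 from rfl, e1, pvBFind_succ ('%' :: c :: r) 0]
    by_cases hc : c = '!' ∨ c = 'b' ∨ c = 't' <;> simp [pvBFind, pvRun, hc]
  | succ n ih =>
    have hg3 : ('%' :: c :: r).getD (n + 2 + 1) ' ' = r.getD (n + 1) ' ' := rfl
    rw [show n + 1 + 2 = (n + 2) + 1 from rfl, pvBFind_succ ('%' :: c :: r) (n + 2),
      pv_getD_cons2, hg3, pvRun_shift2 c r n, ih]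
    conv_rhs => rw [pvBFind_succ r n]
    split_ifs <;> rfl

-- peeling a non-'%' head: position 0 never hits
theorem pvBFind_shift1 {a : Char} (r : List Char) (ha : a ≠ '%') :
    ∀ n, pvBFind (a :: r) (n + 1) = pvBFind r n := by
  intro n
  induction n with
  | zero => simp [pvBFind, ha]
  | succ n ih =>
    have hg2 : (a :: r).getD (n + 1 + 1) ' ' = r.getD (n + 1) ' ' := rfl
    rw [pvBFind_succ (a :: r) (n + 1), pv_getD_cons1, hg2, pvRun_shift1 r ha n, ih]
    exact (pvBFind_succ r n).symm

-- B's backward search computes exactly the pvSpec characterization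
theorem pvBFind_eq_spec (l : List Char) : pvBFind l (l.length - 1) = pvSpec l := by
  induction l using pvTwoStep with
  | h1 => rfl
  | h2 a r ha ih =>
    rw [pvSpec_skip ha]
    cases r with
    | nil => rfl
    | cons b s =>
      rw [show (a :: b :: s).length - 1 = ((b :: s).length - 1) + 1 from by simp,
        pvBFind_shift1 _ ha, ih]
  | h3 => rfl
  | h4 c r ih =>
    rw [pvSpec_cons]
    cases r with
    | nil =>
      by_cases hc : c = '!' ∨ c = 'b' ∨ c = 't' <;>
        simp [pvBFind_succ, pvBFind, pvRun, pvSpec, hc]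
    | cons b s =>
      rw [show ('%' :: c :: b :: s).length - 1 = ((b :: s).length - 1) + 2 from by simp,
        pvBFind_shift2, ih]

-- ===== VERDICT (by name: the statement is the Claim_ definition above) =====
theorem line_end_mode_py_spec : Claim_equal_line_end_mode_py := by
  intro line _
  unfold Spec_line_end_mode_py line_end_mode_py line_end_mode_py_alt
  rw [pvALoop_eq (line.toList.length + 1) line.toList "%t" 0 (by omega) (by omega),
    pvBLoop_eq_find, pvBFind_eq_spec]
  rw [List.drop_zero, pv_fold_tok_eq]
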